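-- pv_equiv track=rewrite | github.com/hassanaiengineer/d_tools | document_embedding_analysis-main/main.py | latex_sections_hierarchical_numbering
-- ===== SOURCE A (Python) =====
-- def latex_sections_hierarchical_numbering(sections, method="counters"):
--     section_counters = {"section": 0, "subsection": 0, "subsubsection": 0}
--     numbered_sections = []
--
--     for section_type, section_title in sections:
--         if method == "counters":
--             if section_type == "section":
--                 section_counters["section"] += 1
--                 section_counters["subsection"] = 0
--                 section_counters["subsubsection"] = 0
--                 section_number = f"{section_counters['section']}"
--             elif section_type == "subsection":
--                 section_counters["subsection"] += 1
--                 section_counters["subsubsection"] = 0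
--                 section_number = f"{section_counters['section']}.{section_counters['subsection']}"
--             elif section_type == "subsubsection":
--                 section_counters["subsubsection"] += 1
--                 section_number = f"{section_counters['section']}.{section_counters['subsection']}.{section_counters['subsubsection']}"
--             section_title = f"{section_number} {section_title}"
--         numbered_sections.append((section_type, section_title))
--
--     return numbered_sections
-- ===== SOURCE B (Python) =====
-- LEVELS = ["section", "subsection", "subsubsection"]
-- LEVEL_INDEX = {name: depth for depth, name in enumerate(LEVELS)}
--
--
-- def _component(seen, lvl):
--     """Count of depth-`lvl` entries in `seen` after the last shallower entry."""
--     n = 0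
--     for t in reversed(seen):
--         d = LEVEL_INDEX[t]
--         if d < lvl:
--             break
--         if d == lvl:
--             n += 1
--     return n
--
--
-- def latex_sections_hierarchical_numbering(sections, method="counters"):
--     if method != "counters":
--         return [(t, title) for t, title in sections]
--     out = []
--     seen = []  # the raw section types so far; no counters are maintained
--     for t, title in sections:
--         seen.append(t)
--         d = LEVEL_INDEX[t]  # KeyError on unknown section types (outside Pre_)
--         number = ".".join(str(_component(seen, lvl)) for lvl in range(d + 1))
--         out.append((t, f"{number} {title}"))
--     return out
-- ===== Notes on version B (the rewrite author's own statement) =====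
-- stated objective: alternative
-- what changed: B maintains no counters at all: it keeps only the raw list of section types seen so far and, for each item, recomputes every number component from scratch by scanning the reversed prefix and counting same-depth entries until the first shallower one, instead of A's stateful per-level counter updates with explicit resets.
import Mathlib
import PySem

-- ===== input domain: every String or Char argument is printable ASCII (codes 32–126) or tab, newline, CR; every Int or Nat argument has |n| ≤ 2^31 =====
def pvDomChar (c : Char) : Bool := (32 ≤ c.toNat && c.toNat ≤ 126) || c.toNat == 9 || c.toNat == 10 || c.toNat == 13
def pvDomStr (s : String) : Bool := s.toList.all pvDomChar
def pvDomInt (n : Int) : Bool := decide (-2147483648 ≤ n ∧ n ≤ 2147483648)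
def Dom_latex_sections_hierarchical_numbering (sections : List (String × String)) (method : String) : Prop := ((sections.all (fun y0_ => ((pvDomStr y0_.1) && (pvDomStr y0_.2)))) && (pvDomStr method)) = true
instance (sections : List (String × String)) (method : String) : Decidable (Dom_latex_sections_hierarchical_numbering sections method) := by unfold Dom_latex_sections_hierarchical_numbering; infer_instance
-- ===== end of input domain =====

-- B keeps no counters: it records only the raw list of section types seen so far and
-- recomputes each number component by a backward scan of that prefix with early stop
-- (a different algorithm of similar size; not faster).


-- ===== PORT A =====
-- A's dict with the three fixed keys is ported as a triple of Ints (section, subsection,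
-- subsubsection); the Python local `section_number`, which survives across iterations, is
-- carried as an Option String (none = unset; Python raises UnboundLocalError when it is
-- read unset — those inputs are outside Pre_).
def pvStepA (method : String)
    (st : Int × Int × Int × Option String × List (String × String)) (p : String × String) :
    Int × Int × Int × Option String × List (String × String) :=
  let (c1, c2, c3, last, acc) := st
  if method == "counters" then
    if p.1 == "section" then
      let c1 := c1 + 1
      let num := PySem.Int.toStr c1
      (c1, 0, 0, some num, acc ++ [(p.1, num ++ " " ++ p.2)])
    else if p.1 == "subsection" then
      let c2 := c2 + 1
      let num := PySem.Int.toStr c1 ++ "." ++ PySem.Int.toStr c2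
      (c1, c2, 0, some num, acc ++ [(p.1, num ++ " " ++ p.2)])
    else if p.1 == "subsubsection" then
      let c3 := c3 + 1
      let num := PySem.Int.toStr c1 ++ "." ++ PySem.Int.toStr c2 ++ "." ++ PySem.Int.toStr c3
      (c1, c2, c3, some num, acc ++ [(p.1, num ++ " " ++ p.2)])
    else
      match last with
      | some num => (c1, c2, c3, some num, acc ++ [(p.1, num ++ " " ++ p.2)])
      | none => (c1, c2, c3, none, acc)  -- Python raises UnboundLocalError here (outside Pre_)
  else (c1, c2, c3, last, acc ++ [(p.1, p.2)])

def latex_sections_hierarchical_numbering (sections : List (String × String)) (method : String) : List (String × String) :=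
  (sections.foldl (pvStepA method) (0, 0, 0, none, [])).2.2.2.2

-- ===== PORT B =====
def pvLEVELS : List String := ["section", "subsection", "subsubsection"]

def pvLEVEL_INDEX : PySem.Dict String Int :=
  PySem.Dict.ofList [("section", 0), ("subsection", 1), ("subsubsection", 2)]

-- _component: walk reversed(seen), break at the first shallower entry, count depth-lvl
-- entries (direct recursion in place of Python's accumulator + break; same sum).
-- The dict lookup's KeyError (unknown type) is outside Pre_; 99 is an arbitrary default.
def pvComponentGo (lvl : Int) : List String → Int
  | [] => 0
  | t :: r =>
    let d := (pvLEVEL_INDEX.get? t).getD 99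
    if d < lvl then 0 else (if d == lvl then 1 else 0) + pvComponentGo lvl r

def pvComponent (seen : List String) (lvl : Int) : Int := pvComponentGo lvl seen.reverse

def pvStepB (st : List String × List (String × String)) (p : String × String) :
    List String × List (String × String) :=
  let seen := st.1 ++ [p.1]
  let d := (pvLEVEL_INDEX.get? p.1).getD 99   -- Python raises KeyError here for unknown types (outside Pre_)
  let number := PySem.Str.join "."
    ((PySem.List.pyRange 0 (d + 1) 1).map (fun lvl => PySem.Int.toStr (pvComponent seen lvl)))
  (seen, st.2 ++ [(p.1, number ++ " " ++ p.2)])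

def latex_sections_hierarchical_numbering_alt (sections : List (String × String)) (method : String) : List (String × String) :=
  if !(method == "counters") then sections.map (fun p => (p.1, p.2))
  else (sections.foldl pvStepB ([], [])).2

-- ===== PRECONDITION & SPEC =====
-- Pre_ excludes, under method = "counters", section lists containing a type other than the
-- three known ones: A raises UnboundLocalError when such a type comes first, and otherwise
-- stamps it with the stale previous number (an accident of leftover loop state); B's
-- dict lookup raises KeyError there.
def Pre_latex_sections_hierarchical_numbering (sections : List (String × String)) (method : String) : Prop :=
  method = "counters" → ∀ p ∈ sections, p.1 ∈ pvLEVELS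
instance (sections : List (String × String)) (method : String) : Decidable (Pre_latex_sections_hierarchical_numbering sections method) := by unfold Pre_latex_sections_hierarchical_numbering; infer_instance

def pvWitness_latex_sections_hierarchical_numbering : (List (String × String)) × String :=
  ([("section", "Intro"), ("subsection", "Background"), ("subsubsection", "History"), ("section", "Methods")], "counters")

def Spec_latex_sections_hierarchical_numbering (sections : List (String × String)) (method : String) (out : List (String × String)) : Prop := out = latex_sections_hierarchical_numbering_alt sections method
instance (sections : List (String × String)) (method : String) (out : List (String × String)) : Decidable (Spec_latex_sections_hierarchical_numbering sections method out) := by unfold Spec_latex_sections_hierarchical_numbering; infer_instance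

-- ===== CLAIM (what is proved, stated in full; the proofs are below) =====
def Claim_equal_latex_sections_hierarchical_numbering : Prop := ∀ (sections : List (String × String)) (method : String), Dom_latex_sections_hierarchical_numbering sections method → Pre_latex_sections_hierarchical_numbering sections method → Spec_latex_sections_hierarchical_numbering sections method (latex_sections_hierarchical_numbering sections method)

-- ===== LEMMAS AND PROOFS =====
theorem pv_join_one (a : String) : PySem.Str.join "." [a] = a := by
  rw [← String.toList_inj]
  simp [PySem.Str.join, PySem.Chars.join, List.intercalate]

theorem pv_join_two (a b : String) : PySem.Str.join "." [a, b] = a ++ "." ++ b := by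
  rw [← String.toList_inj]
  simp [PySem.Str.join, PySem.Chars.join, List.intercalate]

theorem pv_join_three (a b c : String) :
    PySem.Str.join "." [a, b, c] = a ++ "." ++ b ++ "." ++ c := by
  rw [← String.toList_inj]
  simp [PySem.Str.join, PySem.Chars.join, List.intercalate]

-- one snoc-step of the backward scan
theorem pv_comp_snoc (seen : List String) (t : String) (lvl : Int) :
    pvComponent (seen ++ [t]) lvl =
      (if (pvLEVEL_INDEX.get? t).getD 99 < lvl then 0
       else (if (pvLEVEL_INDEX.get? t).getD 99 == lvl then 1 else 0) + pvComponent seen lvl) := by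
  simp [pvComponent, pvComponentGo]

-- main invariant: A's counters are exactly B's recomputed components of the prefix
theorem pv_fold_eq (sections : List (String × String))
    (h : ∀ p ∈ sections, p.1 ∈ pvLEVELS) :
    ∀ (seen : List String) (last : Option String) (acc : List (String × String)),
    (sections.foldl (pvStepA "counters")
        (pvComponent seen 0, pvComponent seen 1, pvComponent seen 2, last, acc)).2.2.2.2 =
      (sections.foldl pvStepB (seen, acc)).2 := by
  have hsec : (pvLEVEL_INDEX.get? "section").getD 99 = 0 := by decide
  have hsub : (pvLEVEL_INDEX.get? "subsection").getD 99 = 1 := by decide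
  have hsss : (pvLEVEL_INDEX.get? "subsubsection").getD 99 = 2 := by decide
  induction sections with
  | nil => intros; rfl
  | cons p rest ih =>
    have hrest : ∀ q ∈ rest, q.1 ∈ pvLEVELS := fun q hq => h q (List.mem_cons_of_mem _ hq)
    intro seen last acc
    have hp : p.1 = "section" ∨ p.1 = "subsection" ∨ p.1 = "subsubsection" := by
      simpa [pvLEVELS] using h p List.mem_cons_self
    simp only [List.foldl_cons]
    rcases hp with h1 | h1 | h1
    · have e0 : pvComponent (seen ++ ["section"]) 0 = pvComponent seen 0 + 1 := by
        rw [pv_comp_snoc, hsec]; simp; omega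
      have e1 : pvComponent (seen ++ ["section"]) 1 = 0 := by rw [pv_comp_snoc, hsec]; simp
      have e2 : pvComponent (seen ++ ["section"]) 2 = 0 := by rw [pv_comp_snoc, hsec]; simp
      simp only [pvStepA, pvStepB, h1, beq_self_eq_true, String.reduceBEq, Bool.false_eq_true,
        reduceIte, hsec]
      rw [show PySem.List.pyRange 0 (0 + 1) 1 = [0] from by decide]
      simp only [List.map_cons, List.map_nil, pv_join_one, e0]
      have H := ih hrest (seen ++ ["section"])
        (some (PySem.Int.toStr (pvComponent seen 0 + 1)))
        (acc ++ [("section", PySem.Int.toStr (pvComponent seen 0 + 1) ++ " " ++ p.2)])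
      rw [e0, e1, e2] at H
      exact H
    · have e0 : pvComponent (seen ++ ["subsection"]) 0 = pvComponent seen 0 := by
        rw [pv_comp_snoc, hsub]; simp
      have e1 : pvComponent (seen ++ ["subsection"]) 1 = pvComponent seen 1 + 1 := by
        rw [pv_comp_snoc, hsub]; simp; omega
      have e2 : pvComponent (seen ++ ["subsection"]) 2 = 0 := by rw [pv_comp_snoc, hsub]; simp
      simp only [pvStepA, pvStepB, h1, beq_self_eq_true, String.reduceBEq, Bool.false_eq_true,
        reduceIte, hsub]
      rw [show PySem.List.pyRange 0 (1 + 1) 1 = [0, 1] from by decide]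
      simp only [List.map_cons, List.map_nil, pv_join_two, e0, e1]
      have H := ih hrest (seen ++ ["subsection"])
        (some (PySem.Int.toStr (pvComponent seen 0) ++ "." ++ PySem.Int.toStr (pvComponent seen 1 + 1)))
        (acc ++ [("subsection", PySem.Int.toStr (pvComponent seen 0) ++ "." ++ PySem.Int.toStr (pvComponent seen 1 + 1) ++ " " ++ p.2)])
      rw [e0, e1, e2] at H
      exact H
    · have e0 : pvComponent (seen ++ ["subsubsection"]) 0 = pvComponent seen 0 := by
        rw [pv_comp_snoc, hsss]; simp
      have e1 : pvComponent (seen ++ ["subsubsection"]) 1 = pvComponent seen 1 := by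
        rw [pv_comp_snoc, hsss]; simp
      have e2 : pvComponent (seen ++ ["subsubsection"]) 2 = pvComponent seen 2 + 1 := by
        rw [pv_comp_snoc, hsss]; simp; omega
      simp only [pvStepA, pvStepB, h1, beq_self_eq_true, String.reduceBEq, Bool.false_eq_true,
        reduceIte, hsss]
      rw [show PySem.List.pyRange 0 (2 + 1) 1 = [0, 1, 2] from by decide]
      simp only [List.map_cons, List.map_nil, pv_join_three, e0, e1, e2]
      have H := ih hrest (seen ++ ["subsubsection"])
        (some (PySem.Int.toStr (pvComponent seen 0) ++ "." ++ PySem.Int.toStr (pvComponent seen 1) ++ "." ++ PySem.Int.toStr (pvComponent seen 2 + 1)))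
        (acc ++ [("subsubsection", PySem.Int.toStr (pvComponent seen 0) ++ "." ++ PySem.Int.toStr (pvComponent seen 1) ++ "." ++ PySem.Int.toStr (pvComponent seen 2 + 1) ++ " " ++ p.2)])
      rw [e0, e1, e2] at H
      exact H

-- the non-"counters" path: A's loop only appends the pairs unchanged
theorem pv_fold_other (method : String) (hm : ¬ method = "counters")
    (sections : List (String × String)) :
    ∀ (st : Int × Int × Int × Option String × List (String × String)),
    (sections.foldl (pvStepA method) st).2.2.2.2 =
      st.2.2.2.2 ++ sections.map (fun p => (p.1, p.2)) := by
  induction sections with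
  | nil => intro st; simp
  | cons p rest ih =>
    intro st
    obtain ⟨c1, c2, c3, last, acc⟩ := st
    simp only [List.foldl_cons, pvStepA, beq_iff_eq, hm, if_false, List.map_cons]
    rw [ih]
    simp

-- ===== VERDICT (by name: the statement is the Claim_ definition above) =====
theorem latex_sections_hierarchical_numbering_spec : Claim_equal_latex_sections_hierarchical_numbering := by
  intro sections method _ hpre
  unfold Spec_latex_sections_hierarchical_numbering
  unfold latex_sections_hierarchical_numbering latex_sections_hierarchical_numbering_alt
  by_cases hm : method = "counters"
  · subst hm
    simp only [beq_self_eq_true, Bool.not_true, Bool.false_eq_true, reduceIte]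
    exact pv_fold_eq sections (hpre rfl) [] none []
  · rw [if_pos (by simp [hm]), pv_fold_other method hm sections]
    simp
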